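-- pv_equiv track=rewrite | github.com/PythonLinzi/My-Alrorithm-Library | SCC-strong-connected-components/Kosaraju.py | process
-- ===== SOURCE A (Python) =====
-- def process(graph:'List[List[int]]'):
--     ''' return adjacency table '''
--     n = len(graph)
--     g, gt = [[] for _ in range(n)], [[] for _ in range(n)]
--     for i in range(n):
--         for j in range(n):
--             if graph[i][j] == 1:
--                 g[i].append(j)
--                 gt[j].append(i)
--     return g, gt
-- ===== SOURCE B (Python) =====
-- def process(graph: 'List[List[int]]'):
--     ''' return adjacency table '''
--     n = len(graph)
--     cols = [[row[j] for row in graph] for j in range(n)]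
--     g = [[j for j, col in enumerate(cols) if col[i] == 1] for i in range(n)]
--     gt = [[i for i, x in enumerate(col) if x == 1] for col in cols]
--     return g, gt
-- ===== Notes on version B (the rewrite author's own statement) =====
-- stated objective: alternative
-- what changed: B never appends into per-vertex buckets: it first materialises the transposed matrix column-major (cols = [[row[j] for row in graph] for j in range(n)]), then reads gt directly off the transpose's rows and g by enumerating across the columns, all as comprehensions, whereas A fills both tables cell-by-cell in one nested row-major index loop with appends.
import Mathlib
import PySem

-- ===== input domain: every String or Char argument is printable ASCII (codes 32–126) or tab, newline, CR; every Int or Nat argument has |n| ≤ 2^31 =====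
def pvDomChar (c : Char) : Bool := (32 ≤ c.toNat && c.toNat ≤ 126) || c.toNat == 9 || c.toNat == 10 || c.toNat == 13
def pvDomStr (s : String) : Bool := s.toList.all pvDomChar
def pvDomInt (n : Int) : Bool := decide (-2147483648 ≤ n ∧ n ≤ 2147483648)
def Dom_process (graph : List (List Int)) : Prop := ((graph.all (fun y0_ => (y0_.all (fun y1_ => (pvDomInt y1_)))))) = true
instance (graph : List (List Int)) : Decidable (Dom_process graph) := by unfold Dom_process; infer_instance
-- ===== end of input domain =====

-- B materialises the transposed matrix column-major and reads both adjacency tables off it with enumerate-comprehensions, instead of A's nested index loop appending into both tables; same return value on Pre_.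


-- xs[i].append(v) for a (nonnegative) Python index i
def pvAppendAt (xs : List (List Int)) (i : Int) (v : Int) : List (List Int) :=
  xs.modify i.toNat (fun r => r ++ [v])

-- ===== PORT A =====
def process (graph : List (List Int)) : List (List Int) × List (List Int) :=
  let n : Int := graph.length
  let init : List (List Int) × List (List Int) :=
    (List.replicate graph.length [], List.replicate graph.length [])
  (PySem.List.pyRange 0 n 1).foldl (fun st i =>
    (PySem.List.pyRange 0 n 1).foldl (fun st j =>
      if PySem.List.pyGetD (PySem.List.pyGetD graph i []) j 0 = 1 then
        (pvAppendAt st.1 i j, pvAppendAt st.2 j i)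
      else st) st) init

-- ===== PORT B =====
-- [j for j, x in enumerate(ys) if x == 1]
def pyFilterOnes (ys : List Int) : List Int :=
  (PySem.List.enumerate ys 0).filterMap (fun p => if p.2 = 1 then some p.1 else none)

def process_alt (graph : List (List Int)) : List (List Int) × List (List Int) :=
  let n : Int := graph.length
  -- cols = [[row[j] for row in graph] for j in range(n)]
  let cols : List (List Int) := (PySem.List.pyRange 0 n 1).map (fun j =>
    graph.map (fun row => PySem.List.pyGetD row j 0))
  -- g = [[j for j, col in enumerate(cols) if col[i] == 1] for i in range(n)]
  let g : List (List Int) := (PySem.List.pyRange 0 n 1).map (fun i =>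
    (PySem.List.enumerate cols 0).filterMap (fun p =>
      if PySem.List.pyGetD p.2 i 0 = 1 then some p.1 else none))
  let gt : List (List Int) := cols.map pyFilterOnes
  (g, gt)

-- ===== PRECONDITION & SPEC =====
-- Pre_ excludes exactly the inputs where A raises IndexError: a row shorter than len(graph).
def Pre_process (graph : List (List Int)) : Prop :=
  ∀ row ∈ graph, graph.length ≤ row.length
instance (graph : List (List Int)) : Decidable (Pre_process graph) := by unfold Pre_process; infer_instance
def pvWitness_process : List (List Int) := [[0, 1], [1, 0]]

def Spec_process (graph : List (List Int)) (out : List (List Int) × List (List Int)) : Prop := out = process_alt graph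
instance (graph : List (List Int)) (out : List (List Int) × List (List Int)) : Decidable (Spec_process graph out) := by unfold Spec_process; infer_instance

-- ===== CLAIM (what is proved, stated in full; the proofs are below) =====
def Claim_equal_process : Prop := ∀ (graph : List (List Int)), Dom_process graph → Pre_process graph → Spec_process graph (process graph)

-- ===== LEMMAS AND PROOFS =====

-- the adjacency list of a row: indices j < n with row[j] == 1, in increasing order
def filtN (row : List Int) (n : Nat) : List Int :=
  (List.range n).filterMap (fun j => if row.getD j 0 = 1 then some ((j : Nat) : Int) else none)

-- column j of the adjacency structure: indices i < m with graph[i][j] == 1, in increasing order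
def colN (graph : List (List Int)) (j : Nat) (m : Nat) : List Int :=
  (List.range m).filterMap (fun i => if (graph.getD i []).getD j 0 = 1 then some ((i : Nat) : Int) else none)

theorem modify_append_nil (xs : List (List Int)) (i : Nat) :
    xs.modify i (fun r => r ++ ([] : List Int)) = xs := by
  have h : (fun r : List Int => r ++ ([] : List Int)) = id := by funext r; simp
  rw [h, List.modify_id]

theorem modify_modify (xs : List (List Int)) (i : Nat) (f g : List Int → List Int) :
    (xs.modify i f).modify i g = xs.modify i (fun r => g (f r)) := by
  induction xs generalizing i with
  | nil => simp [List.modify_nil]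
  | cons x xs ih => cases i <;> simp [ih]

theorem modify_at_len (xs : List (List Int)) (y : List Int) (ys : List (List Int))
    (f : List Int → List Int) :
    (xs ++ y :: ys).modify xs.length f = xs ++ f y :: ys := by
  induction xs with
  | nil => simp [List.modify_cons]
  | cons x xs ih => simp [ih]

theorem filtN_succ (row : List Int) (n : Nat) :
    filtN row (n + 1) = filtN row n ++ (if row.getD n 0 = 1 then [((n : Nat) : Int)] else []) := by
  rw [filtN, filtN, List.range_succ, List.filterMap_append]
  congr 1
  by_cases h : row.getD n 0 = 1 <;>
    (rw [List.getD_eq_getElem?_getD] at h; simp [h])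

-- A's inner loop, g component: all appends hit slot i
theorem innerG (row : List Int) (n : Nat) (i : Nat) (G : List (List Int)) :
    (List.range n).foldl
      (fun G j => if row.getD j 0 = 1 then pvAppendAt G (i : Int) ((j : Nat) : Int) else G) G
    = G.modify i (fun r => r ++ filtN row n) := by
  induction n generalizing G with
  | zero =>
    have h0 : filtN row 0 = [] := rfl
    rw [List.range_zero, List.foldl_nil, h0, modify_append_nil]
  | succ n ih =>
    rw [List.range_succ, List.foldl_append, ih]
    by_cases h : row.getD n 0 = 1
    · simp only [List.foldl_cons, List.foldl_nil, h, if_pos, pvAppendAt, Int.toNat_natCast]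
      rw [modify_modify, filtN_succ, if_pos h]
      simp [List.append_assoc]
    · simp only [List.foldl_cons, List.foldl_nil, h, if_neg, not_false_iff]
      rw [filtN_succ, if_neg h]
      simp

-- A's inner loop, gt component: conditional appends = fold over the filtered list
theorem innerT (row : List Int) (n : Nat) (i : Int) (T : List (List Int)) :
    (List.range n).foldl
      (fun T j => if row.getD j 0 = 1 then pvAppendAt T ((j : Nat) : Int) i else T) T
    = (filtN row n).foldl (fun T j => pvAppendAt T j i) T := by
  rw [filtN, List.foldl_filterMap]
  apply PySem.List.foldl_congr_mem
  intro acc j _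
  by_cases h : row.getD j 0 = 1
  · rw [if_pos h, if_pos h]
  · rw [if_neg h, if_neg h]

-- building g slot by slot from empty rows yields the map
theorem outerG (f : Nat → List Int) (N : Nat) :
    (List.range N).foldl (fun G i => G.modify i (fun r => r ++ f i)) (List.replicate N []) =
      (List.range N).map f := by
  suffices h : ∀ m, m ≤ N →
      (List.range m).foldl (fun G i => G.modify i (fun r => r ++ f i)) (List.replicate N []) =
        (List.range m).map f ++ List.replicate (N - m) [] by
    simpa using h N le_rfl
  intro m hm
  induction m with
  | zero => simp
  | succ m ih =>
    rw [List.range_succ, List.foldl_append, ih (Nat.le_of_succ_le hm), List.map_append]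
    have hrep : List.replicate (N - m) ([] : List Int) =
        ([] : List Int) :: List.replicate (N - (m + 1)) [] := by
      rw [← List.replicate_succ]
      congr 1
      omega
    rw [hrep]
    have hlen : (List.map f (List.range m)).length = m := by simp
    simp only [List.foldl_cons, List.foldl_nil]
    have hmod := modify_at_len (List.map f (List.range m)) []
      (List.replicate (N - (m + 1)) []) (fun r => r ++ f m)
    rw [hlen] at hmod
    rw [hmod]
    simp

-- one append at slot m on a map-over-range table
theorem modify_map_range (h : Nat → List Int) (n m : Nat) (v : Int) :
    ((List.range n).map h).modify m (fun r => r ++ [v])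
      = (List.range n).map (fun j => h j ++ if j = m then [v] else []) := by
  apply List.ext_getElem (by simp [List.length_modify])
  intro j h1 h2
  rw [List.getElem_modify]
  simp only [List.getElem_map, List.getElem_range]
  by_cases hj : m = j
  · subst hj; simp
  · rw [if_neg hj, if_neg (fun hh : j = m => hj hh.symm)]
    simp

-- the fold of one row's appends on a map-over-range table
theorem foldAppend (row : List Int) (n : Nat) (i : Int) (f : Nat → List Int) :
    ∀ m, m ≤ n →
    (filtN row m).foldl (fun T j => pvAppendAt T j i) ((List.range n).map f)
      = (List.range n).map (fun j => f j ++ if j < m ∧ row.getD j 0 = 1 then [i] else []) := by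
  intro m
  induction m with
  | zero =>
    intro _
    have h0 : filtN row 0 = [] := rfl
    rw [h0, List.foldl_nil]
    apply List.map_congr_left
    intro j _
    simp
  | succ m ih =>
    intro hm
    rw [filtN_succ, List.foldl_append, ih (Nat.le_of_succ_le hm)]
    by_cases h : row.getD m 0 = 1
    · rw [if_pos h]
      simp only [List.foldl_cons, List.foldl_nil, pvAppendAt, Int.toNat_natCast]
      rw [modify_map_range]
      apply List.map_congr_left
      intro j hj
      by_cases hjm : j = m
      · subst hjm
        rw [if_neg (fun hc : j < j ∧ _ => Nat.lt_irrefl j hc.1), if_pos rfl,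
            if_pos ⟨Nat.lt_succ_self j, h⟩]
        simp
      · rw [if_neg hjm, List.append_nil]
        congr 1
        apply if_congr _ rfl rfl
        constructor
        · rintro ⟨h1, h2⟩; exact ⟨by omega, h2⟩
        · rintro ⟨h1, h2⟩
          refine ⟨?_, h2⟩
          omega
    · rw [if_neg h, List.foldl_nil]
      apply List.map_congr_left
      intro j _
      by_cases hjm : j = m
      · subst hjm
        rw [if_neg (fun hc : j < j ∧ _ => Nat.lt_irrefl j hc.1),
            if_neg (fun hc : j < j + 1 ∧ _ => h hc.2)]
      · congr 1
        apply if_congr _ rfl rfl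
        constructor
        · rintro ⟨h1, h2⟩; exact ⟨by omega, h2⟩
        · rintro ⟨h1, h2⟩
          refine ⟨?_, h2⟩
          rcases Nat.lt_succ_iff_lt_or_eq.mp h1 with h3 | h3
          · exact h3
          · exact absurd h2 (h3 ▸ h)

theorem colN_succ (graph : List (List Int)) (j m : Nat) :
    colN graph j (m + 1)
      = colN graph j m ++ (if (graph.getD m []).getD j 0 = 1 then [((m : Nat) : Int)] else []) := by
  rw [colN, colN, List.range_succ, List.filterMap_append]
  congr 1
  by_cases h : (graph.getD m []).getD j 0 = 1 <;>
    (simp only [List.getD_eq_getElem?_getD] at h; simp [h])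

-- A's whole gt loop builds the columns
theorem outerT (graph : List (List Int)) (n : Nat) :
    ∀ m, m ≤ n →
    (List.range m).foldl
      (fun T i => (filtN (graph.getD i []) n).foldl
        (fun T j => pvAppendAt T j ((i : Nat) : Int)) T)
      ((List.range n).map (fun _ => ([] : List Int)))
    = (List.range n).map (fun j => colN graph j m) := by
  intro m
  induction m with
  | zero =>
    intro _
    rw [List.range_zero, List.foldl_nil]
    rfl
  | succ m ih =>
    intro hm
    rw [List.range_succ, List.foldl_append, ih (Nat.le_of_succ_le hm)]
    simp only [List.foldl_cons, List.foldl_nil]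
    rw [foldAppend (graph.getD m []) n ((m : Nat) : Int) (fun j => colN graph j m) n le_rfl]
    apply List.map_congr_left
    intro j hj
    rw [colN_succ]
    congr 1
    have hjn : j < n := List.mem_range.mp hj
    exact if_congr (and_iff_right hjn) rfl rfl

-- the enumerate-comprehension is the index filterMap
theorem pyFilterOnes_eq (ys : List Int) :
    pyFilterOnes ys
      = (List.range ys.length).filterMap
          (fun k => if ys.getD k 0 = 1 then some ((k : Nat) : Int) else none) := by
  rw [pyFilterOnes, PySem.List.enumerate_eq_map_pyRange ys 0, List.filterMap_map,
      PySem.List.len_eq, PySem.List.pyRange_zero_nat, List.filterMap_map]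
  apply List.filterMap_congr
  intro k _
  simp [PySem.List.pyGetD_natCast, List.getD_eq_getElem?_getD]

-- getD through a map, at an in-range index
theorem getD_map_lt (xs : List (List Int)) (f : List Int → Int) (i : Nat)
    (h : i < xs.length) (d : Int) :
    (xs.map f).getD i d = f (xs.getD i []) := by
  rw [List.getD_eq_getElem?_getD, List.getElem?_map, List.getElem?_eq_getElem h]
  simp only [Option.map_some, Option.getD_some]
  congr 1
  rw [List.getD_eq_getElem?_getD, List.getElem?_eq_getElem h]
  rfl

theorem process_spec : Claim_equal_process := by
  intro graph _ _
  unfold Spec_process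
  set N := graph.length with hN
  -- A in closed form
  have hA : process graph =
      ((List.range N).map (fun i => filtN (graph.getD i []) N),
       (List.range N).map (fun j => colN graph j N)) := by
    unfold process
    simp only [PySem.List.pyRange_zero_nat, List.foldl_map]
    have hinner : ∀ (i : Nat) (st : List (List Int) × List (List Int)),
        (List.range N).foldl
          (fun st (k : Nat) =>
            if PySem.List.pyGetD (PySem.List.pyGetD graph ((i : Nat) : Int) []) ((k : Nat) : Int) 0 = 1 then
              (pvAppendAt st.1 ((i : Nat) : Int) ((k : Nat) : Int),
               pvAppendAt st.2 ((k : Nat) : Int) ((i : Nat) : Int))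
            else st) st
        = (st.1.modify i (fun r => r ++ filtN (graph.getD i []) N),
           (filtN (graph.getD i []) N).foldl
             (fun T j => pvAppendAt T j ((i : Nat) : Int)) st.2) := by
      intro i st
      obtain ⟨G, T⟩ := st
      have hstep : (fun (st : List (List Int) × List (List Int)) (k : Nat) =>
          if PySem.List.pyGetD (PySem.List.pyGetD graph ((i : Nat) : Int) []) ((k : Nat) : Int) 0 = 1 then
            (pvAppendAt st.1 ((i : Nat) : Int) ((k : Nat) : Int),
             pvAppendAt st.2 ((k : Nat) : Int) ((i : Nat) : Int))
          else st)
          = (fun st k =>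
            ((if (graph.getD i []).getD k 0 = 1 then pvAppendAt st.1 ((i : Nat) : Int) ((k : Nat) : Int) else st.1),
             (if (graph.getD i []).getD k 0 = 1 then pvAppendAt st.2 ((k : Nat) : Int) ((i : Nat) : Int) else st.2))) := by
        funext st k
        rw [PySem.List.pyGetD_natCast, PySem.List.pyGetD_natCast]
        split <;> rfl
      rw [hstep,
        PySem.List.foldl_prod_mk
          (fun G k => if (graph.getD i []).getD k 0 = 1 then pvAppendAt G ((i : Nat) : Int) ((k : Nat) : Int) else G)
          (fun T k => if (graph.getD i []).getD k 0 = 1 then pvAppendAt T ((k : Nat) : Int) ((i : Nat) : Int) else T)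
          (List.range N) G T,
        innerG, innerT]
    have houter : (fun (st : List (List Int) × List (List Int)) (i : Nat) =>
        (List.range N).foldl
          (fun st (k : Nat) =>
            if PySem.List.pyGetD (PySem.List.pyGetD graph ((i : Nat) : Int) []) ((k : Nat) : Int) 0 = 1 then
              (pvAppendAt st.1 ((i : Nat) : Int) ((k : Nat) : Int),
               pvAppendAt st.2 ((k : Nat) : Int) ((i : Nat) : Int))
            else st) st)
        = (fun st i =>
          (st.1.modify i (fun r => r ++ filtN (graph.getD i []) N),
           (filtN (graph.getD i []) N).foldl
             (fun T j => pvAppendAt T j ((i : Nat) : Int)) st.2)) := by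
      funext st i
      exact hinner i st
    rw [houter,
      PySem.List.foldl_prod_mk
        (fun (G : List (List Int)) (i : Nat) =>
          G.modify i fun r => r ++ filtN (graph.getD i []) N)
        (fun (T : List (List Int)) (i : Nat) =>
          (filtN (graph.getD i []) N).foldl
            (fun T j => pvAppendAt T j ((i : Nat) : Int)) T)
        (List.range N) (List.replicate N []) (List.replicate N [])]
    have hrepl : (List.replicate N ([] : List Int)) = (List.range N).map (fun _ => ([] : List Int)) := by
      simp [List.map_const']
    rw [outerG, hrepl, outerT graph N N le_rfl]
  -- B in closed form
  have hcols : (PySem.List.pyRange 0 ((N : Nat) : Int) 1).map (fun j =>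
        graph.map (fun row => PySem.List.pyGetD row j 0))
      = (List.range N).map (fun j => graph.map (fun row => row.getD j 0)) := by
    rw [PySem.List.pyRange_zero_nat, List.map_map]
    apply List.map_congr_left
    intro j _
    simp [PySem.List.pyGetD_natCast]
  have hcolsD : ∀ j < N, ((List.range N).map (fun j => graph.map (fun row => row.getD j 0))).getD j []
      = graph.map (fun row => row.getD j 0) := by
    intro j hj
    exact PySem.List.getD_map_range _ _ _ _ hj
  have hg : ∀ i < N,
      (PySem.List.enumerate ((List.range N).map (fun j => graph.map (fun row => row.getD j 0))) 0).filterMap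
        (fun p => if PySem.List.pyGetD p.2 ((i : Nat) : Int) 0 = 1 then some p.1 else none)
      = filtN (graph.getD i []) N := by
    intro i hi
    rw [PySem.List.enumerate_eq_map_pyRange _ ([] : List Int), List.filterMap_map,
        PySem.List.len_eq, List.length_map, List.length_range,
        PySem.List.pyRange_zero_nat, List.filterMap_map, filtN]
    apply List.filterMap_congr
    intro j hj
    have hjN : j < N := List.mem_range.mp hj
    simp only [Function.comp_apply, PySem.List.pyGetD_natCast, hcolsD j hjN]
    rw [getD_map_lt graph _ i (by omega) 0]
  have hgt : ((List.range N).map (fun j => graph.map (fun row => row.getD j 0))).map pyFilterOnes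
      = (List.range N).map (fun j => colN graph j N) := by
    rw [List.map_map]
    apply List.map_congr_left
    intro j _
    rw [Function.comp_apply, pyFilterOnes_eq, List.length_map, ← hN, colN]
    apply List.filterMap_congr
    intro i hi
    have hiN : i < N := List.mem_range.mp hi
    rw [getD_map_lt graph _ i (by omega) 0]
  have hB : process_alt graph =
      ((List.range N).map (fun i => filtN (graph.getD i []) N),
       (List.range N).map (fun j => colN graph j N)) := by
    unfold process_alt
    simp only [← hN]
    rw [hcols, hgt]
    congr 1
    rw [PySem.List.pyRange_zero_nat, List.map_map]
    apply List.map_congr_left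
    intro i hi
    exact hg i (List.mem_range.mp hi)
  rw [hA, hB]
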